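-- pv_equiv track=rewrite | github.com/THEBLESSMAN867/F.A.R.F.A.N-MECHANISTIC_POLICY_PIPELINE | src/farfan_pipeline/observability/import_scanner.py | _is_allowed_third_party
-- ===== SOURCE A (Python) =====
-- def _is_allowed_third_party(module_name: str, allowed_third_party: frozenset[str]) -> bool:
--     """Check if module is an allowed third-party module or submodule."""
--     parts = module_name.split(".")
--
--     # Try longest prefix → shortest (e.g. foo.bar.baz → foo.bar.baz, foo.bar, foo)
--     for i in range(len(parts), 0, -1):
--         candidate = ".".join(parts[:i])
--         if candidate in allowed_third_party:
--             return True
--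
--     # As a last resort, allow if any single segment is explicitly whitelisted
--     for part in parts:
--         if part in allowed_third_party:
--             return True
--
--     return False
-- ===== SOURCE B (Python) =====
-- def _is_allowed_third_party(module_name: str, allowed_third_party: frozenset) -> bool:
--     """Check if module is an allowed third-party module or submodule.
--
--     Scans the whitelist instead of generating candidates from the module name:
--     an entry matches iff it is a dotted prefix of the module name (string test on
--     the dot-padded module), or it is dot-free and occurs as one segment (substring
--     test on the dot-padded module)."""
--     padded = "." + module_name + "."
--     for allowed in allowed_third_party:
--         dotted = "." + allowed + "."
--         if padded.startswith(dotted) or ("." not in allowed and dotted in padded):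
--             return True
--     return False
-- ===== Notes on version B (the rewrite author's own statement) =====
-- stated objective: alternative
-- what changed: Inverts the direction of the search: instead of generating every dotted prefix and every segment of the module name and looking each up in the whitelist set, B scans the whitelist once and tests each entry directly against the dot-padded module string (a prefix test for submodule matches, a substring test for dot-free entries as segments); this trades A's per-candidate set lookups for per-entry string scans, so B is slower when both the whitelist and the module name are very large.
import Mathlib
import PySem

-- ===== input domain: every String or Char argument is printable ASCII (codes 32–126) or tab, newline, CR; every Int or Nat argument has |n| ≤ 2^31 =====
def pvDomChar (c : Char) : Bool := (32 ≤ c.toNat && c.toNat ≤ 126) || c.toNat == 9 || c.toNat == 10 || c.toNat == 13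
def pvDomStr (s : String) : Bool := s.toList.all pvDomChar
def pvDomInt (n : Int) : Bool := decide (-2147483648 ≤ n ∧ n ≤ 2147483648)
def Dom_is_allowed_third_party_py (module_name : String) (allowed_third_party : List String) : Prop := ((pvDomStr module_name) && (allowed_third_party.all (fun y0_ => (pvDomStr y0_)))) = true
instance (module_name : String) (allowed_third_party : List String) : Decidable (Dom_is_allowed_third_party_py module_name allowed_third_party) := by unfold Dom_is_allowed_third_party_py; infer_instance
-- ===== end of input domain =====

-- B inverts the search direction: it scans the whitelist and tests each entry against the
-- dot-padded module string (a prefix test, or a substring test for dot-free entries) instead of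
-- generating the module's prefixes and segments and looking them up; objective: alternative.

-- ===== PORT A =====
-- A: longest-prefix-first loop with early return, then a per-segment loop, else False.
-- 'split?' with the literal separator "." is always 'some'; '.getD []' only discharges the Option.
def is_allowed_third_party_py (module_name : String) (allowed_third_party : List String) : Bool :=
  let parts := (PySem.Str.split? module_name ".").getD []
  if (PySem.List.pyRange (parts.length : Int) 0 (-1)).any
      (fun i => allowed_third_party.contains
        (PySem.Str.join "." (PySem.List.slice parts (some 0) (some i))))
  then true
  else parts.any (fun part => allowed_third_party.contains part)

-- ===== PORT B =====
-- B: for each whitelist entry, test '.'+entry+'.' as a prefix of '.'+module+'.', or — when the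
-- entry is dot-free — as a substring of it.  String concatenation "."+x+"." is ported exactly on
-- code points as '.' :: x.toList ++ ['.']; the early-return for-loop over the whitelist is
-- List.any (the result is an OR, so iteration order over the frozenset cannot affect it).
def is_allowed_third_party_py_alt (module_name : String) (allowed_third_party : List String) : Bool :=
  let padded : List Char := '.' :: module_name.toList ++ ['.']
  allowed_third_party.any (fun allowed =>
    let dotted : List Char := '.' :: allowed.toList ++ ['.']
    PySem.Chars.startswith padded dotted ||
      (!PySem.Chars.isIn ['.'] allowed.toList && PySem.Chars.isIn dotted padded))

-- ===== PRECONDITION & SPEC =====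
def Spec_is_allowed_third_party_py (module_name : String) (allowed_third_party : List String) (out : Bool) : Prop := out = is_allowed_third_party_py_alt module_name allowed_third_party
instance (module_name : String) (allowed_third_party : List String) (out : Bool) : Decidable (Spec_is_allowed_third_party_py module_name allowed_third_party out) := by unfold Spec_is_allowed_third_party_py; infer_instance

-- ===== CLAIM (what is proved, stated in full; the proofs are below) =====
def Claim_equal_is_allowed_third_party_py : Prop := ∀ (module_name : String) (allowed_third_party : List String), Dom_is_allowed_third_party_py module_name allowed_third_party → Spec_is_allowed_third_party_py module_name allowed_third_party (is_allowed_third_party_py module_name allowed_third_party)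

-- ===== LEMMAS AND PROOFS =====

-- Reference splitter: Python s.split(".") written as plain structural recursion on the characters.
def mySplit : List Char → List (List Char)
  | [] => [[]]
  | c :: rest => if c = '.' then [] :: mySplit rest else (mySplit rest).modifyHead (c :: ·)

-- The module string re-padded with dots: each piece followed by one '.'.
def dottedCat : List (List Char) → List Char := fun ps => ps.flatMap (fun p => p ++ ['.'])

theorem mySplit_ne_nil (cs : List Char) : mySplit cs ≠ [] := by
  induction cs with
  | nil => simp [mySplit]
  | cons c rest ih =>
    simp only [mySplit]
    split
    · simp
    · cases h : mySplit rest with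
      | nil => exact absurd h ih
      | cons a t => simp [List.modifyHead]

theorem splitOn_go_eq (fuel : Nat) (l cur : List Char) (acc : List (List Char))
    (h : l.length ≤ fuel) :
    PySem.Chars.splitOn.go ['.'] fuel l cur acc
      = acc.reverse ++ (mySplit l).modifyHead (cur.reverse ++ ·) := by
  induction fuel generalizing l cur acc with
  | zero =>
    have : l = [] := by cases l <;> simp_all
    subst this
    rw [PySem.Chars.splitOn.go]
    simp [mySplit]
  | succ fuel ih =>
    cases l with
    | nil =>
      rw [PySem.Chars.splitOn.go]
      simp [mySplit]
      omega
    | cons c rest =>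
      rw [PySem.Chars.splitOn.go]
      by_cases hc : c = '.'
      · subst hc
        simp only [List.isPrefixOf, beq_self_eq_true, Bool.true_and, if_pos]
        simp only [show (['.'] : List Char).length = 1 from rfl, List.drop_one, List.tail_cons]
        rw [ih rest [] (List.reverse cur :: acc) (by simpa using h)]
        simp only [mySplit, List.modifyHead, List.reverse_cons, List.reverse_nil,
          List.nil_append, List.append_assoc]
        cases mySplit rest <;> simp
      · have : List.isPrefixOf ['.'] (c :: rest) = false := by
          simp [List.isPrefixOf]; exact fun hh => absurd hh.symm hc
        rw [this]
        simp only [Bool.false_eq_true, if_false]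
        rw [ih rest (c :: cur) acc (by simpa using Nat.le_of_succ_le_succ (by simpa using h))]
        simp only [mySplit, if_neg hc]
        congr 1
        cases hms : mySplit rest with
        | nil => exact absurd hms (mySplit_ne_nil rest)
        | cons a t => simp [List.modifyHead]

theorem splitOn_eq_mySplit (cs : List Char) : PySem.Chars.splitOn cs ['.'] = mySplit cs := by
  unfold PySem.Chars.splitOn
  rw [splitOn_go_eq cs.length.succ cs [] [] (by omega)]
  cases hms : mySplit cs with
  | nil => exact absurd hms (mySplit_ne_nil cs)
  | cons a t => simp [List.modifyHead]

theorem dotfree_mySplit (cs : List Char) (p : List Char) (hp : p ∈ mySplit cs) : '.' ∉ p := by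
  induction cs generalizing p with
  | nil => simp [mySplit] at hp; simp [hp]
  | cons c rest ih =>
    simp only [mySplit] at hp
    split at hp
    · rcases List.mem_cons.1 hp with rfl | hp
      · simp
      · exact ih p hp
    · rename_i hc
      cases hms : mySplit rest with
      | nil => exact absurd hms (mySplit_ne_nil rest)
      | cons a t =>
        rw [hms] at hp
        simp only [List.modifyHead] at hp
        rcases List.mem_cons.1 hp with rfl | hp
        · intro hmem
          rcases List.mem_cons.1 hmem with h1 | h1
          · exact hc h1.symm
          · exact ih a (by rw [hms]; exact List.mem_cons_self) h1
        · exact ih p (by rw [hms]; exact List.mem_cons_of_mem a hp)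

theorem join_modifyHead (c : Char) (r : List (List Char)) (hr : r ≠ []) :
    PySem.Chars.join ['.'] (r.modifyHead (c :: ·)) = c :: PySem.Chars.join ['.'] r := by
  cases r with
  | nil => exact absurd rfl hr
  | cons a t =>
    cases t with
    | nil => simp [List.modifyHead, PySem.Chars.join, List.intercalate]
    | cons b t' =>
      simp only [List.modifyHead]
      rw [PySem.Chars.join_cons_cons, PySem.Chars.join_cons_cons]
      simp

theorem join_mySplit (cs : List Char) : PySem.Chars.join ['.'] (mySplit cs) = cs := by
  induction cs with
  | nil => simp [mySplit, PySem.Chars.join, List.intercalate]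
  | cons c rest ih =>
    simp only [mySplit]
    by_cases hc : c = '.'
    · subst hc
      rw [if_pos rfl]
      cases hms : mySplit rest with
      | nil => exact absurd hms (mySplit_ne_nil rest)
      | cons a t =>
        rw [PySem.Chars.join_cons_cons]
        rw [hms] at ih
        simp [ih]
    · rw [if_neg hc, join_modifyHead c _ (mySplit_ne_nil rest), ih]

theorem dottedCat_eq (ps : List (List Char)) (h : ps ≠ []) :
    dottedCat ps = PySem.Chars.join ['.'] ps ++ ['.'] := by
  induction ps with
  | nil => exact absurd rfl h
  | cons a t ih =>
    cases t with
    | nil => simp [dottedCat, PySem.Chars.join, List.intercalate]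
    | cons b t' =>
      rw [PySem.Chars.join_cons_cons]
      have : dottedCat (a :: b :: t') = a ++ ['.'] ++ dottedCat (b :: t') := by
        simp [dottedCat]
      rw [this, ih (by simp)]
      simp

-- a++['.'] as a prefix of p++'.'::rest either stops exactly at p's closing dot or runs past it.
theorem prefix_classify (a p rest : List Char) (hp : '.' ∉ p)
    (h : a ++ ['.'] <+: p ++ '.' :: rest) :
    a = p ∨ ∃ b, a = p ++ '.' :: b ∧ b ++ ['.'] <+: rest := by
  have ha : a <+: p ++ '.' :: rest := (List.prefix_append a ['.']).trans h
  have hp' : p <+: p ++ '.' :: rest := List.prefix_append p ('.' :: rest)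
  rcases List.prefix_or_prefix_of_prefix ha hp' with hap | hpa
  · obtain ⟨t, rfl⟩ := hap
    cases t with
    | nil => left; simp
    | cons c t' =>
      exfalso
      have h2 : a ++ ['.'] <+: a ++ (c :: t' ++ '.' :: rest) := by simpa using h
      rw [List.prefix_append_right_inj, List.cons_append, List.cons_prefix_cons] at h2
      exact hp (by simp [← h2.1])
  · obtain ⟨t, rfl⟩ := hpa
    cases t with
    | nil => left; simp
    | cons c t' =>
      right
      have h2 : p ++ (c :: t' ++ ['.']) <+: p ++ '.' :: rest := by simpa using h
      rw [List.prefix_append_right_inj, List.cons_append, List.cons_prefix_cons] at h2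
      exact ⟨t', by simp [h2.1], h2.2⟩

-- The dotted prefixes of the module are exactly the joins of the first k pieces.
theorem prefix_iff (p : List Char) (ps : List (List Char)) (al : List Char)
    (hdf : ∀ q ∈ p :: ps, '.' ∉ q) :
    (al ++ ['.'] <+: dottedCat (p :: ps)) ↔
      ∃ k : Nat, 1 ≤ k ∧ k ≤ ps.length + 1 ∧ al = PySem.Chars.join ['.'] ((p :: ps).take k) := by
  induction ps generalizing p al with
  | nil =>
    constructor
    · intro h
      have h' : al ++ ['.'] <+: p ++ '.' :: [] := by
        simpa [dottedCat] using h
      rcases prefix_classify al p [] (hdf p (by simp)) h' with rfl | ⟨b, rfl, hb⟩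
      · exact ⟨1, by simp [PySem.Chars.join, List.intercalate]⟩
      · exact absurd hb (by simp)
    · rintro ⟨k, hk1, hk2, rfl⟩
      have : k = 1 := by simp at hk2; omega
      subst this
      simp [dottedCat, PySem.Chars.join, List.intercalate]
  | cons q ps' ih =>
    have hsplit : dottedCat (p :: q :: ps') = p ++ '.' :: dottedCat (q :: ps') := by
      simp [dottedCat]
    constructor
    · intro h
      rw [hsplit] at h
      rcases prefix_classify al p _ (hdf p (by simp)) h with rfl | ⟨b, rfl, hb⟩
      · exact ⟨1, by simp [PySem.Chars.join, List.intercalate]⟩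
      · have := (ih q b (by intro x hx; exact hdf x (List.mem_cons_of_mem p hx))).1 hb
        rcases this with ⟨k, hk1, hk2, rfl⟩
        obtain ⟨k', rfl⟩ : ∃ k', k = k' + 1 := ⟨k - 1, by omega⟩
        refine ⟨k' + 2, by omega, by simp; omega, ?_⟩
        simp only [List.take_succ_cons, PySem.Chars.join_cons_cons]
        simp
    · rintro ⟨k, hk1, hk2, rfl⟩
      rw [hsplit]
      obtain ⟨k', rfl⟩ : ∃ k', k = k' + 1 := ⟨k - 1, by omega⟩
      cases k' with
      | zero =>
        refine ⟨dottedCat (q :: ps'), ?_⟩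
        simp [PySem.Chars.join, List.intercalate]
      | succ k'' =>
        have hb : PySem.Chars.join ['.'] ((q :: ps').take (k'' + 1)) ++ ['.']
            <+: dottedCat (q :: ps') :=
          (ih q _ (by intro x hx; exact hdf x (List.mem_cons_of_mem p hx))).2
            ⟨k'' + 1, by omega, by simp at hk2 ⊢; omega, rfl⟩
        simp only [List.take_succ_cons, PySem.Chars.join_cons_cons] at hb ⊢
        obtain ⟨t, ht⟩ := hb
        refine ⟨t, ?_⟩
        simp only [List.append_assoc, List.cons_append, List.nil_append] at ht ⊢
        rw [ht]

-- A substring starting with '.' cannot start inside a dot-free block.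
theorem infix_skip (q : List Char) (hq : '.' ∉ q) (w rest : List Char)
    (h : ('.' :: w) <:+: q ++ rest) : ('.' :: w) <:+: rest := by
  induction q with
  | nil => simpa using h
  | cons c q' ih =>
    have hc : c ≠ '.' := fun hh => hq (by simp [hh])
    rw [List.cons_append, List.infix_cons_iff] at h
    rcases h with h | h
    · rw [List.cons_prefix_cons] at h
      exact absurd h.1.symm hc
    · exact ih (fun hh => hq (List.mem_cons_of_mem c hh)) h

-- A dot-free al occurs dot-delimited in the padded module iff it is one of the pieces.
theorem infix_iff (ps : List (List Char)) (al : List Char)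
    (hdf : ∀ q ∈ ps, '.' ∉ q) (hal : '.' ∉ al) :
    (('.' :: al ++ ['.']) <:+: ('.' :: dottedCat ps)) ↔ al ∈ ps := by
  induction ps with
  | nil =>
    simp only [dottedCat, List.flatMap_nil, List.not_mem_nil, iff_false]
    intro h
    have := h.length_le
    simp at this
  | cons p ps' ih =>
    have hsplit : dottedCat (p :: ps') = p ++ '.' :: dottedCat ps' := by
      simp [dottedCat]
    rw [hsplit]
    constructor
    · intro h
      rw [List.infix_cons_iff] at h
      rcases h with h | h
      · rw [List.cons_append, List.cons_prefix_cons] at h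
        rcases prefix_classify al p _ (hdf p (by simp)) h.2 with rfl | ⟨b, rfl, _⟩
        · exact List.mem_cons_self
        · exact absurd (by simp) hal
      · have h' : ('.' :: (al ++ ['.'])) <:+: ('.' :: dottedCat ps') :=
          infix_skip p (hdf p (by simp)) _ _ (by simpa using h)
        exact List.mem_cons_of_mem p
          ((ih (fun x hx => hdf x (List.mem_cons_of_mem p hx))).1 (by simpa using h'))
    · intro h
      rcases List.mem_cons.1 h with rfl | h
      · refine ⟨[], dottedCat ps', ?_⟩
        simp
      · have := (ih (fun x hx => hdf x (List.mem_cons_of_mem p hx))).2 h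
        have hsuf : ('.' :: dottedCat ps') <:+ ('.' :: (p ++ '.' :: dottedCat ps')) := by
          refine ⟨'.' :: p, ?_⟩
          simp
        exact this.trans hsuf.isInfix

theorem singleton_infix_iff_mem (x : Char) (l : List Char) : [x] <:+: l ↔ x ∈ l := by
  constructor
  · intro h
    exact (List.singleton_sublist).1 h.sublist
  · intro h
    obtain ⟨s, t, rfl⟩ := List.append_of_mem h
    exact ⟨s, t, by simp⟩

-- what it means for one whitelist entry to match, on A's side and on B's side
def AProp (m a : String) : Prop :=
  (∃ k : Nat, 1 ≤ k ∧ k ≤ (mySplit m.toList).length ∧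
      a = PySem.Str.join "." (((mySplit m.toList).map String.ofList).take k)) ∨
    a ∈ (mySplit m.toList).map String.ofList

def BProp (m a : String) : Prop :=
  ('.' :: a.toList ++ ['.']) <+: ('.' :: m.toList ++ ['.']) ∨
    ('.' ∉ a.toList ∧ ('.' :: a.toList ++ ['.']) <:+: ('.' :: m.toList ++ ['.']))

theorem padded_eq (m : String) : '.' :: m.toList ++ ['.'] = '.' :: dottedCat (mySplit m.toList) := by
  rw [dottedCat_eq _ (mySplit_ne_nil m.toList), join_mySplit]
  simp

theorem pointwise (m a : String) : AProp m a ↔ BProp m a := by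
  unfold AProp BProp
  rw [padded_eq m]
  obtain ⟨p, ps0, hps⟩ : ∃ p ps0, mySplit m.toList = p :: ps0 := by
    cases h : mySplit m.toList with
    | nil => exact absurd h (mySplit_ne_nil m.toList)
    | cons p t => exact ⟨p, t, rfl⟩
  have hdf : ∀ q ∈ p :: ps0, '.' ∉ q := fun q hq => dotfree_mySplit m.toList q (hps ▸ hq)
  have hjoin : ∀ k : Nat,
      (PySem.Str.join "." (((p :: ps0).map String.ofList).take k)).toList
        = PySem.Chars.join ['.'] ((p :: ps0).take k) := by
    intro k
    rw [PySem.Str.toList_join, ← List.map_take, List.map_map]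
    simp [Function.comp_def, String.toList_ofList]
  rw [hps]
  constructor
  · rintro (⟨k, hk1, hk2, rfl⟩ | ha)
    · left
      rw [List.cons_append, List.cons_prefix_cons]
      refine ⟨rfl, ?_⟩
      rw [hjoin k]
      exact (prefix_iff p ps0 _ hdf).2 ⟨k, hk1, by simpa using hk2, rfl⟩
    · obtain ⟨x, hx, rfl⟩ := List.mem_map.1 ha
      right
      rw [String.toList_ofList]
      exact ⟨hdf x hx, (infix_iff (p :: ps0) x hdf (hdf x hx)).2 hx⟩
  · rintro (hpre | ⟨hdot, hinf⟩)
    · rw [List.cons_append, List.cons_prefix_cons] at hpre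
      obtain ⟨k, hk1, hk2, hal⟩ := (prefix_iff p ps0 a.toList hdf).1 hpre.2
      left
      refine ⟨k, hk1, by simpa using hk2, ?_⟩
      have h2 := hjoin k
      rw [← hal] at h2
      calc a = String.ofList a.toList := String.ofList_toList.symm
        _ = _ := by rw [← h2, String.ofList_toList]
    · right
      exact List.mem_map.2 ⟨a.toList, (infix_iff (p :: ps0) a.toList hdf hdot).1 hinf,
        String.ofList_toList⟩

theorem alt_iff (m : String) (allowed : List String) :
    is_allowed_third_party_py_alt m allowed = true ↔ ∃ a ∈ allowed, BProp m a := by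
  simp only [is_allowed_third_party_py_alt, List.any_eq_true]
  refine exists_congr fun a => and_congr_right fun _ => ?_
  simp only [Bool.or_eq_true, Bool.and_eq_true, Bool.not_eq_true', PySem.Chars.startswith_iff,
    PySem.Chars.isIn_iff_infix, PySem.Chars.isIn_eq_false_iff, singleton_infix_iff_mem, BProp]

theorem orig_iff (m : String) (allowed : List String) :
    is_allowed_third_party_py m allowed = true ↔ ∃ a ∈ allowed, AProp m a := by
  simp only [is_allowed_third_party_py]
  have hparts : (PySem.Str.split? m ".").getD [] = (mySplit m.toList).map String.ofList := by
    simp [PySem.Str.split?, PySem.Chars.split?, splitOn_eq_mySplit]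
  rw [hparts, Bool.if_true_left]
  simp only [decide_eq_true_eq, Bool.or_eq_true, List.any_eq_true, List.contains_iff_mem]
  constructor
  · rintro (⟨i, hi, hc⟩ | ⟨x, hx, hc⟩)
    · rw [PySem.List.mem_pyRange_neg_one] at hi
      have h0 : (0:Int) ≤ i := le_of_lt hi.1
      rw [PySem.List.slice_zero_start, PySem.List.slice_to _ h0] at hc
      refine ⟨_, hc, Or.inl ⟨i.toNat, by omega, ?_, rfl⟩⟩
      have h2 := hi.2
      rw [List.length_map] at h2
      omega
    · exact ⟨x, hc, Or.inr hx⟩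
  · rintro ⟨a, ha, hPA⟩
    rcases hPA with ⟨k, hk1, hk2, rfl⟩ | hx
    · left
      refine ⟨(k : Int), ?_, ?_⟩
      · rw [PySem.List.mem_pyRange_neg_one]
        constructor
        · omega
        · rw [List.length_map]; exact_mod_cast hk2
      · rw [PySem.List.slice_zero_start, PySem.List.slice_to _ (by omega)]
        simpa using ha
    · exact Or.inr ⟨a, hx, ha⟩

-- ===== VERDICT (by name: the statement is the Claim_ definition above) =====
theorem is_allowed_third_party_py_spec : Claim_equal_is_allowed_third_party_py := by
  intro m allowed _
  unfold Spec_is_allowed_third_party_py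
  rw [Bool.eq_iff_iff, orig_iff, alt_iff]
  exact exists_congr fun a => and_congr_right fun _ => pointwise m a
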